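-- pv_equiv track=rewrite | github.com/hellsmenser/Mycego_test_task | main.py | flat_list_to_rectangle_nested
-- ===== SOURCE A (Python) =====
-- from math import sqrt, ceil
--
-- def flat_list_to_rectangle_nested(lst):
--     """
--         transform list of images to rectangle form
--     :param lst: list to transform
--     :return: neasted list with rectangle form
--     """
--     nested_list = []
--     size = ceil(sqrt(len(lst)))
--     row = []
--
--     for i, element in enumerate(lst):
--         row.append(element)
--         if len(row) % size == 0:
--             nested_list.append(row)
--             row = []
--     if len(row) > 0:
--         row += ["placeholder" for i in range(size - len(row))]
--         nested_list.append(row)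
--
--     return nested_list
-- ===== SOURCE B (Python) =====
-- from math import sqrt, ceil
--
-- def flat_list_to_rectangle_nested(lst):
--     """Reshape lst into rows of size ceil(sqrt(len(lst))), padding the last row."""
--     if not lst:
--         return []
--     size = ceil(sqrt(len(lst)))
--
--     def rows(rest):
--         if len(rest) <= size:
--             return [rest + ["placeholder"] * (size - len(rest))]
--         return [rest[:size]] + rows(rest[size:])
--
--     return rows(lst)
-- ===== Notes on version B (the rewrite author's own statement) =====
-- stated objective: simpler
-- what changed: Replaces the element-by-element accumulator loop with modulo tests and an end-of-loop flush by recursive slicing: take a size-slice, recurse on the rest, and pad only the final short slice.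
import Mathlib
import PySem

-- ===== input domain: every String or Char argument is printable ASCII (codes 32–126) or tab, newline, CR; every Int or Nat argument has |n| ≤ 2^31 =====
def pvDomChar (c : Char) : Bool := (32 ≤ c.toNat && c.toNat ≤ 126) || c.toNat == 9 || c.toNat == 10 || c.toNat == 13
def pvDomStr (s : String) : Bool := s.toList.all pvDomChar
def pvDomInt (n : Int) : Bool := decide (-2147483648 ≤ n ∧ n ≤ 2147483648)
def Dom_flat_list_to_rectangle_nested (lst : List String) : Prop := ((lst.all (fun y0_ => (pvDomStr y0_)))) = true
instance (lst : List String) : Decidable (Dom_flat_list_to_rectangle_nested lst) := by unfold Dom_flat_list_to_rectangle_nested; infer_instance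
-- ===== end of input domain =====

-- B replaces A's accumulator loop (modulo test + end flush) with recursive slicing that pads only the final short slice; objective: simpler.

-- ===== PORT A =====
-- ceil(sqrt(n)) on Nat, exact (Python computes it via float sqrt; exact on these list lengths)
def pvCeilSqrt (n : Nat) : Nat :=
  let s := Nat.sqrt n
  if s * s = n then s else s + 1

def pvStepA (size : Nat) (p : List (List String) × List String) (element : String) :
    List (List String) × List String :=
  let row := p.2 ++ [element]
  if row.length % size = 0 then (p.1 ++ [row], []) else (p.1, row)

def flat_list_to_rectangle_nested (lst : List String) : List (List String) :=
  let size := pvCeilSqrt lst.length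
  let p := lst.foldl (pvStepA size) ([], [])
  if p.2.length > 0 then p.1 ++ [p.2 ++ List.replicate (size - p.2.length) "placeholder"]
  else p.1

-- ===== PORT B =====
-- Source B's inner 'rows'; 'sp' is size - 1 (size is ≥ 1 whenever rows is called, and
-- encoding it as sp + 1 makes the slicing recursion visibly terminating)
def pvRowsB (sp : Nat) (l : List String) : List (List String) :=
  if l.length ≤ sp + 1 then [l ++ List.replicate (sp + 1 - l.length) "placeholder"]
  else l.take (sp + 1) :: pvRowsB sp (l.drop (sp + 1))
termination_by l.length
decreasing_by simp_all; omega

def flat_list_to_rectangle_nested_alt (lst : List String) : List (List String) :=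
  if lst.isEmpty then [] else pvRowsB (pvCeilSqrt lst.length - 1) lst

-- ===== PRECONDITION & SPEC =====
def Spec_flat_list_to_rectangle_nested (lst : List String) (out : List (List String)) : Prop := out = flat_list_to_rectangle_nested_alt lst
instance (lst : List String) (out : List (List String)) : Decidable (Spec_flat_list_to_rectangle_nested lst out) := by unfold Spec_flat_list_to_rectangle_nested; infer_instance

-- ===== CLAIM (what is proved, stated in full; the proofs are below) =====
def Claim_equal_flat_list_to_rectangle_nested : Prop := ∀ (lst : List String), Dom_flat_list_to_rectangle_nested lst → Spec_flat_list_to_rectangle_nested lst (flat_list_to_rectangle_nested lst)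

-- ===== LEMMAS AND PROOFS =====

-- A's final flush as a function of the loop state
def pvFinishA (size : Nat) (p : List (List String) × List String) : List (List String) :=
  if p.2.length > 0 then p.1 ++ [p.2 ++ List.replicate (size - p.2.length) "placeholder"]
  else p.1

-- the accumulator is only ever appended to: it factors out of the fold
theorem pvStepA_prefix (size : Nat) (l : List String) (acc : List (List String))
    (row : List String) :
    l.foldl (pvStepA size) (acc, row)
      = (acc ++ (l.foldl (pvStepA size) ([], row)).1, (l.foldl (pvStepA size) ([], row)).2) := by
  induction l generalizing acc row with
  | nil => simp
  | cons x xs ih =>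
    simp only [List.foldl_cons, pvStepA]
    split
    · simp only [List.nil_append]
      rw [ih (acc ++ [row ++ [x]]) [], ih [row ++ [x]] []]
      simp
    · exact ih acc (row ++ [x])

-- filling a row that stays strictly short: the append never fires
theorem pvStepA_fill_under (sp : Nat) (l : List String) (acc : List (List String))
    (row : List String) (h : row.length + l.length < sp + 1) :
    l.foldl (pvStepA (sp + 1)) (acc, row) = (acc, row ++ l) := by
  induction l generalizing acc row with
  | nil => simp
  | cons x xs ih =>
    simp only [List.foldl_cons, pvStepA]
    have hlt : (row ++ [x]).length % (sp + 1) ≠ 0 := by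
      simp only [List.length_append, List.length_cons, List.length_nil]
      simp only [List.length_cons] at h
      rw [Nat.mod_eq_of_lt (by omega)]; omega
    rw [if_neg hlt, ih acc (row ++ [x]) (by simp at *; omega)]
    simp

-- filling a row to exactly full size: the append fires on the last element
theorem pvStepA_fill_exact (sp : Nat) (l : List String) (acc : List (List String))
    (row : List String) (h : row.length + l.length = sp + 1) (hne : l ≠ []) :
    l.foldl (pvStepA (sp + 1)) (acc, row) = (acc ++ [row ++ l], []) := by
  induction l generalizing acc row with
  | nil => exact absurd rfl hne
  | cons x xs ih =>
    simp only [List.foldl_cons, pvStepA]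
    rcases Decidable.em (xs = []) with hxs | hxs
    · subst hxs
      simp only [List.length_cons, List.length_nil] at h
      have hc : (row ++ [x]).length % (sp + 1) = 0 := by
        simp only [List.length_append, List.length_cons, List.length_nil]
        rw [show row.length + 1 = sp + 1 by omega]; simp
      rw [if_pos hc]; simp
    · have hxl : 0 < xs.length := List.length_pos_iff.mpr hxs
      simp only [List.length_cons] at h
      have hlt : (row ++ [x]).length % (sp + 1) ≠ 0 := by
        simp only [List.length_append, List.length_cons, List.length_nil]
        rw [Nat.mod_eq_of_lt (by omega)]; omega
      rw [if_neg hlt, ih acc (row ++ [x]) (by simp; omega) hxs]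
      simp

-- main loop characterisation: A's loop + flush computes B's recursive slicing
theorem pvLoop_eq_rows (sp : Nat) (l : List String) (hne : l ≠ []) :
    pvFinishA (sp + 1) (l.foldl (pvStepA (sp + 1)) ([], [])) = pvRowsB sp l := by
  induction hn : l.length using Nat.strong_induction_on generalizing l with
  | _ n ih =>
  subst hn
  have hl : 0 < l.length := List.length_pos_iff.mpr hne
  rcases Decidable.em (l.length ≤ sp + 1) with hle | hgt
  · rw [pvRowsB, if_pos hle]
    rcases Decidable.em (l.length = sp + 1) with heq | hne2
    · rw [pvStepA_fill_exact sp l [] [] (by simpa using heq) hne]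
      simp [pvFinishA, heq]
    · rw [pvStepA_fill_under sp l [] [] (by simp; omega)]
      simp [pvFinishA, hl]
  · rw [Nat.not_le] at hgt
    have hsplit : l = l.take (sp + 1) ++ l.drop (sp + 1) := (List.take_append_drop _ _).symm
    have htk : (l.take (sp + 1)).length = sp + 1 := by simp; omega
    have hdropne : l.drop (sp + 1) ≠ [] := by
      intro h; have := congrArg List.length h; simp at this; omega
    conv_lhs => rw [hsplit]
    rw [List.foldl_append,
      pvStepA_fill_exact sp (l.take (sp + 1)) [] [] (by simp [htk]) (by
        intro h; rw [h] at htk; simp at htk)]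
    simp only [List.nil_append]
    rw [pvStepA_prefix (sp + 1) (l.drop (sp + 1)) [List.take (sp + 1) l] []]
    have hdlen : (l.drop (sp + 1)).length < l.length := by simp; omega
    have hrec := ih (l.drop (sp + 1)).length hdlen (l.drop (sp + 1)) hdropne rfl
    rw [pvRowsB, if_neg (by omega), ← hrec]
    simp only [pvFinishA]
    split <;> simp

theorem pvCeilSqrt_pos (n : Nat) (h : 0 < n) : 0 < pvCeilSqrt n := by
  unfold pvCeilSqrt
  dsimp only
  split
  · rename_i he
    have : Nat.sqrt n ≠ 0 := by intro h0; rw [h0] at he; simp at he; omega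
    omega
  · omega

-- ===== VERDICT (by name: the statement is the Claim_ definition above) =====
theorem flat_list_to_rectangle_nested_spec : Claim_equal_flat_list_to_rectangle_nested := by
  intro lst _
  show pvFinishA (pvCeilSqrt lst.length) (lst.foldl (pvStepA (pvCeilSqrt lst.length)) ([], []))
      = flat_list_to_rectangle_nested_alt lst
  unfold flat_list_to_rectangle_nested_alt
  rcases Decidable.em (lst = []) with h | h
  · subst h; simp [pvFinishA]
  · have hl : 0 < lst.length := List.length_pos_iff.mpr h
    have hsz : 0 < pvCeilSqrt lst.length := pvCeilSqrt_pos _ hl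
    rw [if_neg (by simp [h])]
    set sp' := pvCeilSqrt lst.length - 1 with hdef
    rw [show pvCeilSqrt lst.length = sp' + 1 by omega]
    exact pvLoop_eq_rows sp' lst h
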